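-- pv_equiv track=rewrite | github.com/perfecxion-ai/perfecxion-site | scripts/fix-blog-formatting.py | fix_frontmatter
-- ===== SOURCE A (Python) =====
-- def fix_frontmatter(content):
--     """Fix frontmatter to match website standards"""
--
--     # Replace non-standard frontmatter fields
--     replacements = {
--         'publishDate:': 'date:',
--         'readingTime:': 'readTime:',
--         'authorRole:': '# authorRole:',
--         'category: "Industry Deep Dive"': 'category: "Industry Applications"',
--         'category: "Governance & Strategy"': 'category: "Compliance & Governance"',
--         'category: "Technical Deep Dive"': 'category: "Technical Research"',
--         'category: "Implementation Guide"': 'category: "Implementation Guides"',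
--         'category: "Security Analysis"': 'category: "AI Security"',
--         'category: "Red Team Operations"': 'category: "Red Team Testing"',
--         'category: "Enterprise Strategy"': 'category: "Compliance & Governance"',
--         'category: "Threat Intelligence"': 'category: "AI Security"',
--         'category: "Financial Security"': 'category: "Industry Applications"',
--         'category: "Critical Infrastructure"': 'category: "Industry Applications"',
--         'category: "Program Development"': 'category: "Implementation Guides"',
--         'category: "Future Threats"': 'category: "AI Security"'
--     }
--
--     for old, new in replacements.items():
--         content = content.replace(old, new)
--
--     # Add missing fields if they don't exist
--     if 'featured:' not in content:
--         content = content.replace('toc: true', 'featured: false\ntoc: true')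
--
--     return content
-- ===== SOURCE B (Python) =====
-- def fix_frontmatter(content):
--     """Fix frontmatter to match website standards (single left-to-right scan)"""
--
--     replacements = {
--         'publishDate:': 'date:',
--         'readingTime:': 'readTime:',
--         'authorRole:': '# authorRole:',
--         'category: "Industry Deep Dive"': 'category: "Industry Applications"',
--         'category: "Governance & Strategy"': 'category: "Compliance & Governance"',
--         'category: "Technical Deep Dive"': 'category: "Technical Research"',
--         'category: "Implementation Guide"': 'category: "Implementation Guides"',
--         'category: "Security Analysis"': 'category: "AI Security"',
--         'category: "Red Team Operations"': 'category: "Red Team Testing"',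
--         'category: "Enterprise Strategy"': 'category: "Compliance & Governance"',
--         'category: "Threat Intelligence"': 'category: "AI Security"',
--         'category: "Financial Security"': 'category: "Industry Applications"',
--         'category: "Critical Infrastructure"': 'category: "Industry Applications"',
--         'category: "Program Development"': 'category: "Implementation Guides"',
--         'category: "Future Threats"': 'category: "AI Security"'
--     }
--
--     # One pass over the text: at each position emit either the replacement of
--     # the (unique) key starting there, or the character itself.  The keys are
--     # mutually non-overlapping and no replacement re-creates a key, so this
--     # equals the sequential all-occurrence replacements.
--     out = []
--     i = 0
--     n = len(content)
--     while i < n: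
--         for old, new in replacements.items():
--             if content.startswith(old, i):
--                 out.append(new)
--                 i += len(old)
--                 break
--         else:
--             out.append(content[i])
--             i += 1
--     content = ''.join(out)
--
--     # Add missing fields if they don't exist
--     if 'featured:' not in content:
--         content = content.replace('toc: true', 'featured: false\ntoc: true')
--
--     return content
-- ===== Notes on version B (the rewrite author's own statement) =====
-- stated objective: alternative
-- what changed: Replaces the 15 sequential whole-string .replace passes by a single left-to-right scan that at each position substitutes the unique matching key (the keys are mutually non-overlapping and no replacement text re-creates a later key, so one pass gives the same result); the conditional featured:/toc step is kept as-is.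
import Mathlib
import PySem

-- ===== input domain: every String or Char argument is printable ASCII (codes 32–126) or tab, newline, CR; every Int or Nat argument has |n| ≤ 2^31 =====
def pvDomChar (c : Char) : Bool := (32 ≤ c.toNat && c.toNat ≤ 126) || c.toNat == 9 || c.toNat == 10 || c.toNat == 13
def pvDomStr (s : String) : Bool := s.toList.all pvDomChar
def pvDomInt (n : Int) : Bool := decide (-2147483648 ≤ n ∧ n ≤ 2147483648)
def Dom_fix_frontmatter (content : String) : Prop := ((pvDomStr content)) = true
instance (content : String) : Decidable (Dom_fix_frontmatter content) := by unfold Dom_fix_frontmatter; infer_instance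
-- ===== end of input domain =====

-- B replaces A's 15 sequential whole-string replace passes by ONE left-to-right scan that
-- substitutes the unique key matching at each position (objective: alternative algorithm).

-- ===== PORT A =====
def fix_frontmatter (content : String) : String :=
  let content := PySem.Str.replace content "publishDate:" "date:"
  let content := PySem.Str.replace content "readingTime:" "readTime:"
  let content := PySem.Str.replace content "authorRole:" "# authorRole:"
  let content := PySem.Str.replace content "category: \"Industry Deep Dive\"" "category: \"Industry Applications\""
  let content := PySem.Str.replace content "category: \"Governance & Strategy\"" "category: \"Compliance & Governance\""
  let content := PySem.Str.replace content "category: \"Technical Deep Dive\"" "category: \"Technical Research\""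
  let content := PySem.Str.replace content "category: \"Implementation Guide\"" "category: \"Implementation Guides\""
  let content := PySem.Str.replace content "category: \"Security Analysis\"" "category: \"AI Security\""
  let content := PySem.Str.replace content "category: \"Red Team Operations\"" "category: \"Red Team Testing\""
  let content := PySem.Str.replace content "category: \"Enterprise Strategy\"" "category: \"Compliance & Governance\""
  let content := PySem.Str.replace content "category: \"Threat Intelligence\"" "category: \"AI Security\""
  let content := PySem.Str.replace content "category: \"Financial Security\"" "category: \"Industry Applications\""
  let content := PySem.Str.replace content "category: \"Critical Infrastructure\"" "category: \"Industry Applications\""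
  let content := PySem.Str.replace content "category: \"Program Development\"" "category: \"Implementation Guides\""
  let content := PySem.Str.replace content "category: \"Future Threats\"" "category: \"AI Security\""
  if PySem.Str.isIn "featured:" content then content
  else PySem.Str.replace content "toc: true" "featured: false\ntoc: true"

-- ===== PORT B =====
-- the replacements dict of Source B, in insertion order
def pvKeyTable : List (List Char × List Char) :=
  [ ("publishDate:".toList, "date:".toList),
    ("readingTime:".toList, "readTime:".toList),
    ("authorRole:".toList, "# authorRole:".toList),
    ("category: \"Industry Deep Dive\"".toList, "category: \"Industry Applications\"".toList),
    ("category: \"Governance & Strategy\"".toList, "category: \"Compliance & Governance\"".toList),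
    ("category: \"Technical Deep Dive\"".toList, "category: \"Technical Research\"".toList),
    ("category: \"Implementation Guide\"".toList, "category: \"Implementation Guides\"".toList),
    ("category: \"Security Analysis\"".toList, "category: \"AI Security\"".toList),
    ("category: \"Red Team Operations\"".toList, "category: \"Red Team Testing\"".toList),
    ("category: \"Enterprise Strategy\"".toList, "category: \"Compliance & Governance\"".toList),
    ("category: \"Threat Intelligence\"".toList, "category: \"AI Security\"".toList),
    ("category: \"Financial Security\"".toList, "category: \"Industry Applications\"".toList),
    ("category: \"Critical Infrastructure\"".toList, "category: \"Industry Applications\"".toList),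
    ("category: \"Program Development\"".toList, "category: \"Implementation Guides\"".toList),
    ("category: \"Future Threats\"".toList, "category: \"AI Security\"".toList) ]

-- Source B's while-loop: at each position emit the replacement of the first key that
-- starts there (the for/break), else the character itself
def scanRepl (l : List Char) : List Char :=
  match l with
  | [] => []
  | c :: rest =>
    match pvKeyTable.find? (fun p => p.1.isPrefixOf (c :: rest)) with
    | some p => p.2 ++ scanRepl (rest.drop (p.1.length - 1))
    | none => c :: scanRepl rest
termination_by l.length
decreasing_by
  · simp only [List.length_cons, List.length_drop]; omega
  · simp only [List.length_cons]; omega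

def fix_frontmatter_alt (content : String) : String :=
  let content := String.ofList (scanRepl content.toList)
  if PySem.Str.isIn "featured:" content then content
  else PySem.Str.replace content "toc: true" "featured: false\ntoc: true"

-- ===== PRECONDITION & SPEC =====
def Spec_fix_frontmatter (content : String) (out : String) : Prop := out = fix_frontmatter_alt content
instance (content : String) (out : String) : Decidable (Spec_fix_frontmatter content out) := by unfold Spec_fix_frontmatter; infer_instance

-- ===== CLAIM (what is proved, stated in full; the proofs are below) =====
def Claim_equal_fix_frontmatter : Prop := ∀ (content : String), Dom_fix_frontmatter content → Spec_fix_frontmatter content (fix_frontmatter content)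

-- ===== LEMMAS AND PROOFS =====

-- one replace pass (Chars.replace with nonempty old), in direct recursive form
def repOne (old nw : List Char) (l : List Char) : List Char :=
  match l with
  | [] => []
  | c :: t =>
    if old.isPrefixOf (c :: t) then nw ++ repOne old nw (t.drop (old.length - 1))
    else c :: repOne old nw t
termination_by l.length
decreasing_by
  · simp only [List.length_cons, List.length_drop]; omega
  · simp only [List.length_cons]; omega

-- the 15 passes of A, chained
def chain (ps : List (List Char × List Char)) (l : List Char) : List Char :=
  ps.foldl (fun acc p => repOne p.1 p.2 acc) l

-- "neither is a prefix of the other"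
def mmB (u v : List Char) : Bool := !(u.isPrefixOf v) && !(v.isPrefixOf u)

lemma mm_left {u v : List Char} (h : mmB u v = true) : ¬ u <+: v := by
  simp only [mmB, Bool.and_eq_true, Bool.not_eq_true', ← Bool.not_eq_true] at h
  exact fun hp => h.1 (List.isPrefixOf_iff_prefix.2 hp)

lemma mm_right {u v : List Char} (h : mmB u v = true) : ¬ v <+: u := by
  simp only [mmB, Bool.and_eq_true, Bool.not_eq_true', ← Bool.not_eq_true] at h
  exact fun hp => h.2 (List.isPrefixOf_iff_prefix.2 hp)

lemma not_prefix_append {u v x : List Char} (h : mmB u v = true) : ¬ u <+: v ++ x := by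
  intro hp
  rcases le_total u.length v.length with hle | hle
  · exact mm_left h (List.prefix_of_prefix_length_le hp (List.prefix_append v x) hle)
  · exact mm_right h (List.prefix_of_prefix_length_le (List.prefix_append v x) hp hle)

-- FINITE FACTS about the key table (checked by kernel computation)
lemma keys_ne_nil : ∀ p ∈ pvKeyTable, p.1 ≠ [] := by decide

-- no suffix of a key is prefix-comparable with any key (q = 0 only for distinct keys)
lemma factBC : ∀ p' ∈ pvKeyTable, ∀ p ∈ pvKeyTable, ∀ q ∈ List.range p.1.length,
    (q = 0 → p'.1 ≠ p.1) → mmB p'.1 (p.1.drop q) = true := by decide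

-- no nonempty proper suffix of a key is prefix-comparable with any replacement text
lemma factA : ∀ po ∈ pvKeyTable, ∀ pk ∈ pvKeyTable, ∀ q ∈ List.range pk.1.length,
    1 ≤ q → mmB (pk.1.drop q) po.2 = true := by decide

-- replacement texts are prefix-incomparable with every LATER key, at every offset
def pvTailOK : List (List Char × List Char) → Bool
  | [] => true
  | p :: rest =>
    (rest.all (fun p'' => (List.range p.2.length).all (fun q => mmB p''.1 (p.2.drop q)))) && pvTailOK rest

lemma factD : pvTailOK pvKeyTable = true := by decide

lemma tailOK_suffix (xs : List (List Char × List Char)) :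
    ∀ ys, pvTailOK (xs ++ ys) = true → pvTailOK ys = true := by
  induction xs with
  | nil => intro ys h; exact h
  | cons p xs ih =>
      intro ys h
      simp only [List.cons_append, pvTailOK, Bool.and_eq_true] at h
      exact ih ys h.2

-- a repOne pass walks over a block it can never match in
lemma repOne_passover (old nw : List Char) :
    ∀ (a t : List Char), (∀ q, q < a.length → ¬ old <+: (a.drop q ++ t)) →
    repOne old nw (a ++ t) = a ++ repOne old nw t := by
  intro a
  induction a with
  | nil => intro t _; rfl
  | cons c a' ih =>
      intro t h
      have h0 : ¬ old <+: (c :: (a' ++ t)) := by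
        have := h 0 (by simp); simpa using this
      rw [List.cons_append, repOne]
      rw [if_neg (by simpa [List.isPrefixOf_iff_prefix] using h0)]
      rw [ih t (fun q hq => by simpa using h (q + 1) (by simpa using hq))]
      rfl

-- no pass can CREATE a match of (a nonempty proper suffix of) a key at the head
lemma safe : ∀ (n : Nat) (po pk : List Char × List Char), po ∈ pvKeyTable → pk ∈ pvKeyTable →
    ∀ (q : Nat) (s : List Char), 1 ≤ q → s.length ≤ n → ¬ (pk.1.drop q <+: s) →
    ¬ (pk.1.drop q <+: repOne po.1 po.2 s) := by
  intro n
  induction n with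
  | zero =>
      intro po pk _ _ q s _ hlen hns
      have : s = [] := List.length_eq_zero_iff.1 (Nat.le_zero.1 hlen)
      subst this; rw [repOne]; exact hns
  | succ n ih =>
      intro po pk hpo hpk q s hq hlen hns
      match s with
      | [] => rw [repOne]; exact hns
      | c :: s' =>
        rw [repOne]
        by_cases hm : po.1.isPrefixOf (c :: s') = true
        · rw [if_pos hm]
          by_cases hql : q < pk.1.length
          · exact not_prefix_append (factA po hpo pk hpk q (List.mem_range.2 hql) hq)
          · exfalso
            have : pk.1.drop q = [] := List.drop_eq_nil_of_le (le_of_not_gt hql)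
            rw [this] at hns; exact hns List.nil_prefix
        · rw [if_neg hm]
          intro hpre
          match hT : pk.1.drop q with
          | [] => rw [hT] at hns; exact hns List.nil_prefix
          | t0 :: t' =>
            rw [hT] at hpre hns
            rcases List.cons_prefix_cons.1 hpre with ⟨rfl, hpre'⟩
            have ht' : t' = pk.1.drop (q + 1) := by
              have := congrArg List.tail hT; simpa [List.tail_drop] using this.symm
            have hns' : ¬ (pk.1.drop (q + 1) <+: s') := by
              rw [← ht']; intro hp; exact hns (List.cons_prefix_cons.2 ⟨rfl, hp⟩)
            have := ih po pk hpo hpk (q + 1) s' (by omega) (by simpa using Nat.lt_succ_iff.1 (by simpa using hlen)) hns'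
            rw [← ht'] at this
            exact this hpre'

-- a block no pass of ps can match in passes through the whole chain
lemma chain_pass (ps : List (List Char × List Char))
    (a : List Char)
    (h : ∀ p'' ∈ ps, ∀ t, repOne p''.1 p''.2 (a ++ t) = a ++ repOne p''.1 p''.2 t) :
    ∀ Y, chain ps (a ++ Y) = a ++ chain ps Y := by
  induction ps with
  | nil => intro Y; rfl
  | cons p ps ih =>
      intro Y
      simp only [chain, List.foldl_cons]
      rw [h p (by simp)]
      exact ih (fun p'' hm t => h p'' (by simp [hm]) t) (repOne p.1 p.2 Y)

lemma chain_nil : ∀ ps, chain ps [] = [] := by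
  intro ps
  induction ps with
  | nil => rfl
  | cons p ps ih => simp only [chain, List.foldl_cons] at *; rw [repOne]; exact ih

-- if no key of ps matches at the head, the head character passes through the chain
lemma chain_cons (c : Char) :
    ∀ (ps : List (List Char × List Char)), (∀ p ∈ ps, p ∈ pvKeyTable) →
    ∀ rest, (∀ p ∈ ps, ¬ p.1 <+: (c :: rest)) →
    chain ps (c :: rest) = c :: chain ps rest := by
  intro ps
  induction ps with
  | nil => intro _ rest _; rfl
  | cons p ps ih =>
      intro hsub rest h
      have hp := h p (by simp)
      have hstep0 : chain (p :: ps) (c :: rest) = chain ps (repOne p.1 p.2 (c :: rest)) := rfl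
      have hrep : repOne p.1 p.2 (c :: rest) = c :: repOne p.1 p.2 rest := by
        rw [repOne, if_neg (by simpa [List.isPrefixOf_iff_prefix] using hp)]
      have hstep1 : chain (p :: ps) rest = chain ps (repOne p.1 p.2 rest) := rfl
      rw [hstep0, hrep, hstep1]
      have hstep : ∀ p' ∈ ps, ¬ p'.1 <+: (c :: repOne p.1 p.2 rest) := by
        intro p' hp' hpre
        match hK : p'.1 with
        | [] => exact keys_ne_nil p' (hsub p' (by simp [hp'])) hK
        | d :: t =>
          rw [hK] at hpre
          rcases List.cons_prefix_cons.1 hpre with ⟨rfl, hpre'⟩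
          have hnt : ¬ (t <+: rest) := by
            intro hp2
            exact h p' (by simp [hp']) (by rw [hK]; exact List.cons_prefix_cons.2 ⟨rfl, hp2⟩)
          have ht : t = p'.1.drop 1 := by rw [hK]; rfl
          have := safe rest.length p (p'.1, p'.2) (hsub p (by simp)) (by simpa using hsub p' (by simp [hp'])) 1 rest (le_refl 1) (le_refl _) (by simpa [← ht] using hnt)
          rw [← ht] at this
          exact this hpre'
      exact ih (fun p' hm => hsub p' (by simp [hm])) (repOne p.1 p.2 rest) hstep

-- one pass walks over a foreign key unchanged
lemma repOne_pass_key (p' p : List Char × List Char) (h' : p' ∈ pvKeyTable) (h : p ∈ pvKeyTable)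
    (hne : p'.1 ≠ p.1) (t : List Char) :
    repOne p'.1 p'.2 (p.1 ++ t) = p.1 ++ repOne p'.1 p'.2 t := by
  apply repOne_passover
  intro q hq
  exact not_prefix_append (factBC p' h' p h q (List.mem_range.2 hq) (fun _ => hne))

-- head-match step of repOne
lemma repOne_match (p : List Char × List Char) (hp : p ∈ pvKeyTable) (X : List Char) :
    repOne p.1 p.2 (p.1 ++ X) = p.2 ++ repOne p.1 p.2 X := by
  match hK : p.1 with
  | [] => exact absurd hK (keys_ne_nil p hp)
  | c :: k' =>
      rw [List.cons_append, repOne]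
      rw [if_pos (List.isPrefixOf_iff_prefix.2 (by rw [← List.cons_append]; exact List.prefix_append _ _))]
      congr 1
      congr 1
      simp

-- MAIN: the single scan equals the 15 chained passes
lemma scan_eq_chain : ∀ (n : Nat) (l : List Char), l.length ≤ n → chain pvKeyTable l = scanRepl l := by
  intro n
  induction n with
  | zero =>
      intro l hl
      have : l = [] := List.length_eq_zero_iff.1 (Nat.le_zero.1 hl)
      subst this; rw [scanRepl]; exact chain_nil _
  | succ n ih =>
      intro l hl
      match l with
      | [] => rw [scanRepl]; exact chain_nil _
      | c :: rest =>
        rw [scanRepl]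
        cases hfind : pvKeyTable.find? (fun p => p.1.isPrefixOf (c :: rest)) with
        | none =>
            have hall := List.find?_eq_none.1 hfind
            rw [chain_cons c pvKeyTable (fun _ hp => hp) rest
                (fun p hp => fun hpre => hall p hp (List.isPrefixOf_iff_prefix.2 hpre))]
            rw [ih rest (by simpa using Nat.lt_succ_iff.1 (by simpa using hl))]
        | some p =>
            rcases List.find?_eq_some_iff_append.1 hfind with ⟨hpb, pre, post, htbl, hprefalse⟩
            have hpmem : p ∈ pvKeyTable := by rw [htbl]; simp
            have hppre : p.1 <+: (c :: rest) := List.isPrefixOf_iff_prefix.1 hpb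
            rcases hppre with ⟨s2, hs2⟩
            match hK : p.1 with
            | [] => exact absurd hK (keys_ne_nil p hpmem)
            | d :: k' =>
              rw [hK] at hs2
              simp only [List.cons_append] at hs2
              have hdc : d = c := by injection hs2
              have hrest : rest = k' ++ s2 := by injection hs2 with h1 h2; exact h2.symm
              subst hdc
              have hs2drop : s2 = rest.drop (p.1.length - 1) := by
                rw [hrest, hK]; simp
              -- chain over the decomposition pre ++ p :: post
              have hchain : chain pvKeyTable (d :: rest) = p.2 ++ chain pvKeyTable s2 := by
                have hl2 : (d :: rest) = p.1 ++ s2 := by rw [hK, hrest]; simp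
                rw [htbl, hl2]
                have hpre_mem : ∀ p' ∈ pre, p' ∈ pvKeyTable := by
                  intro p' hp'; rw [htbl]; simp [hp']
                have hpre_ne : ∀ p' ∈ pre, p'.1 ≠ p.1 := by
                  intro p' hp' heq
                  have h1 := hprefalse p' hp'
                  rw [Bool.not_eq_eq_eq_not, Bool.not_true, heq, hpb] at h1
                  exact Bool.noConfusion h1
                have h1 : chain pre (p.1 ++ s2) = p.1 ++ chain pre s2 :=
                  chain_pass pre p.1 (fun p'' hm t => repOne_pass_key p'' p (hpre_mem p'' hm) hpmem (hpre_ne p'' hm) t) s2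
                have hpost : ∀ p'' ∈ post, ∀ t, repOne p''.1 p''.2 (p.2 ++ t) = p.2 ++ repOne p''.1 p''.2 t := by
                  intro p'' hm t
                  have hT : pvTailOK (p :: post) = true := tailOK_suffix pre (p :: post) (by rw [← htbl]; exact factD)
                  simp only [pvTailOK, Bool.and_eq_true, List.all_eq_true] at hT
                  apply repOne_passover
                  intro q hq
                  exact not_prefix_append (by simpa using hT.1 p'' hm q (by simpa using List.mem_range.2 hq))
                calc chain (pre ++ p :: post) (p.1 ++ s2)
                    = chain post (repOne p.1 p.2 (chain pre (p.1 ++ s2))) := by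
                      simp [chain, List.foldl_append]
                  _ = chain post (p.2 ++ repOne p.1 p.2 (chain pre s2)) := by
                      rw [h1, repOne_match p hpmem]
                  _ = p.2 ++ chain post (repOne p.1 p.2 (chain pre s2)) :=
                      chain_pass post p.2 hpost _
                  _ = p.2 ++ chain (pre ++ p :: post) s2 := by
                      simp [chain, List.foldl_append]
              have hlen2 : s2.length ≤ n := by
                have : (d :: rest).length = p.1.length + s2.length := by
                  rw [hK, hrest]; simp only [List.length_cons, List.length_append]; omega
                have hk1 : 1 ≤ p.1.length := by rw [hK]; simp
                simp only [List.length_cons] at hl this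
                omega
              rw [hchain]
              show p.2 ++ chain pvKeyTable s2 = p.2 ++ scanRepl (List.drop (p.1.length - 1) rest)
              rw [← hs2drop, ih s2 hlen2]

-- unfolding equations of PySem.Chars.replace.go
lemma go_zero (old nw l acc : List Char) :
    PySem.Chars.replace.go old nw 0 l acc = acc.reverse ++ l := rfl

lemma go_nil (old nw : List Char) (fuel : Nat) (acc : List Char) :
    PySem.Chars.replace.go old nw (fuel + 1) [] acc = acc.reverse := rfl

lemma go_cons (old nw : List Char) (fuel : Nat) (c : Char) (t acc : List Char) :
    PySem.Chars.replace.go old nw (fuel + 1) (c :: t) acc =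
      if old.isPrefixOf (c :: t) then
        PySem.Chars.replace.go old nw fuel (List.drop old.length (c :: t)) (nw.reverse ++ acc)
      else PySem.Chars.replace.go old nw fuel t (c :: acc) := rfl

-- Chars.replace (nonempty old) equals repOne
lemma go_eq (old nw : List Char) (h : old ≠ []) :
    ∀ (fuel : Nat) (l acc : List Char), l.length ≤ fuel →
    PySem.Chars.replace.go old nw fuel l acc = acc.reverse ++ repOne old nw l := by
  intro fuel
  induction fuel with
  | zero =>
      intro l acc hl
      have : l = [] := List.length_eq_zero_iff.1 (Nat.le_zero.1 hl)
      subst this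
      rw [go_zero, repOne]
  | succ fuel ih =>
      intro l acc hl
      match l with
      | [] => rw [go_nil, repOne]; simp
      | c :: t =>
        rw [go_cons, repOne]
        by_cases hm : old.isPrefixOf (c :: t) = true
        · rw [if_pos hm, if_pos hm]
          have hdrop : List.drop old.length (c :: t) = t.drop (old.length - 1) := by
            match old, h with
            | o :: old', _ => simp
          rw [hdrop]
          rw [ih (t.drop (old.length - 1)) (nw.reverse ++ acc) (by simp only [List.length_drop]; simp only [List.length_cons] at hl; omega)]
          simp
        · rw [if_neg hm, if_neg hm]
          rw [ih t (c :: acc) (by simp only [List.length_cons] at hl; omega)]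
          simp

lemma replace_eq (l old nw : List Char) (h : old ≠ []) :
    PySem.Chars.replace l old nw = repOne old nw l := by
  rw [PySem.Chars.replace, if_neg (by simpa [List.isEmpty_iff] using h)]
  exact go_eq old nw h l.length l [] (le_refl _)

-- ===== VERDICT (by name: the statement is the Claim_ definition above) =====
theorem fix_frontmatter_spec : Claim_equal_fix_frontmatter := by
  intro content _
  unfold Spec_fix_frontmatter fix_frontmatter fix_frontmatter_alt
  have hB : scanRepl content.toList = chain pvKeyTable content.toList :=
    (scan_eq_chain content.toList.length content.toList (le_refl _)).symm
  -- the 15 replace passes, bridged to repOne form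
  simp only [PySem.Str.replace, String.toList_ofList]
  rw [hB]
  simp only [chain, pvKeyTable, List.foldl_cons, List.foldl_nil]
  rw [replace_eq _ _ _ (by decide), replace_eq _ _ _ (by decide), replace_eq _ _ _ (by decide),
      replace_eq _ _ _ (by decide), replace_eq _ _ _ (by decide), replace_eq _ _ _ (by decide),
      replace_eq _ _ _ (by decide), replace_eq _ _ _ (by decide), replace_eq _ _ _ (by decide),
      replace_eq _ _ _ (by decide), replace_eq _ _ _ (by decide), replace_eq _ _ _ (by decide),
      replace_eq _ _ _ (by decide), replace_eq _ _ _ (by decide), replace_eq _ _ _ (by decide)]
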